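-- pv_equiv track=rewrite | github.com/mananmulchandani-star/IntelliResume-Backend | app.py | generate_professional_title
-- ===== SOURCE A (Python) =====
-- def generate_professional_title(user_prompt, specific_field, experience_level):
--     """Generate appropriate professional title based on user data"""
--     prompt_lower = user_prompt.lower()
--
--     # Education-based titles
--     if any(word in prompt_lower for word in ['bca', 'computer', 'software', 'programming']):
--         if experience_level == 'Student':
--             return "Computer Science Student"
--         elif experience_level == 'Fresher':
--             return "Aspiring Software Developer"
--         else:
--             return "Software Developer"
--
--     elif any(word in prompt_lower for word in ['engineering', 'engineer']):
--         return "Engineering Student" if experience_level == 'Student' else "Engineer"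
--
--     elif any(word in prompt_lower for word in ['business', 'management', 'mba']):
--         return "Business Student" if experience_level == 'Student' else "Business Professional"
--
--     elif any(word in prompt_lower for word in ['design', 'creative', 'art']):
--         return "Design Student" if experience_level == 'Student' else "Designer"
--
--     # Field-specific titles
--     if specific_field:
--         if 'computer' in specific_field.lower():
--             return "Computer Science Student" if experience_level == 'Student' else "IT Professional"
--         elif 'commerce' in specific_field.lower():
--             return "Commerce Student" if experience_level == 'Student' else "Commerce Graduate"
--         elif 'science' in specific_field.lower():
--             return "Science Student" if experience_level == 'Student' else "Science Professional"
--
--     # Default based on experience level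
--     if experience_level == 'Student':
--         return "Student / Recent Graduate"
--     elif experience_level == 'Fresher':
--         return "Entry-Level Professional"
--     elif experience_level == 'Experienced':
--         return "Experienced Professional"
--     else:
--         return "Professional"
-- ===== SOURCE B (Python) =====
-- # B: one left-to-right scan over the text keeps the best (lowest-priority-number)
-- # keyword group starting at each position, instead of A's chain of independent
-- # substring searches with early returns.
--
-- _KEYWORDS = [
--     ("bca", 0), ("computer", 0), ("software", 0), ("programming", 0),
--     ("engineering", 1), ("engineer", 1),
--     ("business", 2), ("management", 2), ("mba", 2),
--     ("design", 3), ("creative", 3), ("art", 3),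
-- ]
--
-- _FIELDS = [("computer", 0), ("commerce", 1), ("science", 2)]
--
-- _STUDENT = ("Computer Science Student", "Engineering Student",
--             "Business Student", "Design Student")
-- _GENERAL = ("Software Developer", "Engineer", "Business Professional", "Designer")
-- _FIELD_STUDENT = ("Computer Science Student", "Commerce Student", "Science Student")
-- _FIELD_GENERAL = ("IT Professional", "Commerce Graduate", "Science Professional")
--
-- _DEFAULTS = {'Student': "Student / Recent Graduate",
--              'Fresher': "Entry-Level Professional",
--              'Experienced': "Experienced Professional"}
--
--
-- def _scan(text, table, miss):
--     """Single pass: at each index, lower any table word that starts there into best."""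
--     best = miss
--     for i in range(len(text)):
--         for w, g in table:
--             if g < best and text.startswith(w, i):
--                 best = g
--     return best
--
--
-- def generate_professional_title(user_prompt, specific_field, experience_level):
--     """Generate appropriate professional title based on user data"""
--     g = _scan(user_prompt.lower(), _KEYWORDS, 4)
--     if g < 4:
--         if experience_level == 'Student':
--             return _STUDENT[g]
--         if g == 0 and experience_level == 'Fresher':
--             return "Aspiring Software Developer"
--         return _GENERAL[g]
--     if specific_field:
--         f = _scan(specific_field.lower(), _FIELDS, 3)
--         if f < 3:
--             return _FIELD_STUDENT[f] if experience_level == 'Student' else _FIELD_GENERAL[f]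
--     return _DEFAULTS.get(experience_level, "Professional")
-- ===== Notes on version B (the rewrite author's own statement) =====
-- stated objective: alternative
-- what changed: Replaced A's chain of independent substring searches (any(word in prompt) per group) by a single left-to-right scan of the text that at each position keeps the lowest-numbered priority group of any keyword starting there, then dispatches on that group number; the field check and level defaults use the same scanner and small index tables.
import Mathlib
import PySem

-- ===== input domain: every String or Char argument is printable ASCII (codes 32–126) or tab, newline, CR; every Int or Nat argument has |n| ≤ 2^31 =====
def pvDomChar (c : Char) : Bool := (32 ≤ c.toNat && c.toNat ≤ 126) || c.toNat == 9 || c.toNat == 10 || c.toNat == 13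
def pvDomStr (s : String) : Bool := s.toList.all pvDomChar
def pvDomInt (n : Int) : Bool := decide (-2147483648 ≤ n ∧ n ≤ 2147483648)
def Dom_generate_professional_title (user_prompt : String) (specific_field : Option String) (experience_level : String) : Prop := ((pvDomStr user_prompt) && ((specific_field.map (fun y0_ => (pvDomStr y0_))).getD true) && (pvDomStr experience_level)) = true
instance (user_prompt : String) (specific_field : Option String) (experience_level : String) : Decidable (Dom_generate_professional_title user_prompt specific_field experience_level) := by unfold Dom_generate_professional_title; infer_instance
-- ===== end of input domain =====

-- B replaces A's chain of independent substring searches by a single left-to-right scan of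
-- the text that keeps the best (lowest) priority group of any keyword starting at each
-- position (objective: alternative algorithm, same cost).

-- ===== PORT A =====
-- literal transliteration of A's if/elif chain; the trailing experience-level
-- default chain (reached from several fallthrough points) is a helper
def pvADefault (experience_level : String) : String :=
  if experience_level == "Student" then "Student / Recent Graduate"
  else if experience_level == "Fresher" then "Entry-Level Professional"
  else if experience_level == "Experienced" then "Experienced Professional"
  else "Professional"

def pvAField (specific_field : Option String) (experience_level : String) : String :=
  match specific_field with
  | some s =>
    if s ≠ "" then
      if PySem.Str.isIn "computer" (PySem.Str.lower s) then
        (if experience_level == "Student" then "Computer Science Student" else "IT Professional")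
      else if PySem.Str.isIn "commerce" (PySem.Str.lower s) then
        (if experience_level == "Student" then "Commerce Student" else "Commerce Graduate")
      else if PySem.Str.isIn "science" (PySem.Str.lower s) then
        (if experience_level == "Student" then "Science Student" else "Science Professional")
      else pvADefault experience_level
    else pvADefault experience_level
  | none => pvADefault experience_level

def generate_professional_title (user_prompt : String) (specific_field : Option String) (experience_level : String) : String :=
  let prompt_lower := PySem.Str.lower user_prompt
  if (["bca", "computer", "software", "programming"].any (fun w => PySem.Str.isIn w prompt_lower)) then
    if experience_level == "Student" then "Computer Science Student"
    else if experience_level == "Fresher" then "Aspiring Software Developer"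
    else "Software Developer"
  else if (["engineering", "engineer"].any (fun w => PySem.Str.isIn w prompt_lower)) then
    (if experience_level == "Student" then "Engineering Student" else "Engineer")
  else if (["business", "management", "mba"].any (fun w => PySem.Str.isIn w prompt_lower)) then
    (if experience_level == "Student" then "Business Student" else "Business Professional")
  else if (["design", "creative", "art"].any (fun w => PySem.Str.isIn w prompt_lower)) then
    (if experience_level == "Student" then "Design Student" else "Designer")
  else
    pvAField specific_field experience_level

-- ===== PORT B =====
-- Source B's keyword/field priority tables
def pvKeywords : List (List Char × Nat) :=
  [("bca".toList, 0), ("computer".toList, 0), ("software".toList, 0), ("programming".toList, 0),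
   ("engineering".toList, 1), ("engineer".toList, 1),
   ("business".toList, 2), ("management".toList, 2), ("mba".toList, 2),
   ("design".toList, 3), ("creative".toList, 3), ("art".toList, 3)]

def pvFields : List (List Char × Nat) :=
  [("computer".toList, 0), ("commerce".toList, 1), ("science".toList, 2)]

-- inner loop of Source B's _scan: lower `best` by any table word starting at index i
-- (text.startswith(w, i) with 0 ≤ i is exactly: w is a prefix of text[i:])
def pvScanStep (text : List Char) (table : List (List Char × Nat)) (i : Nat) (b : Nat) : Nat :=
  table.foldl (fun b wg =>
    if decide (wg.2 < b) && PySem.Chars.startswith (text.drop i) wg.1 then wg.2 else b) b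

-- outer loop of _scan: for i in range(len(text))
def pvScan (text : List Char) (table : List (List Char × Nat)) (miss : Nat) : Nat :=
  (List.range text.length).foldl (fun best i => pvScanStep text table i best) miss

-- tuple indexing _STUDENT[g] etc.; exact for the in-range indexes the guards allow
def pvStudentTitle : Nat → String
  | 0 => "Computer Science Student" | 1 => "Engineering Student"
  | 2 => "Business Student" | _ => "Design Student"

def pvGeneralTitle : Nat → String
  | 0 => "Software Developer" | 1 => "Engineer"
  | 2 => "Business Professional" | _ => "Designer"

def pvFieldStudentTitle : Nat → String
  | 0 => "Computer Science Student" | 1 => "Commerce Student" | _ => "Science Student"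

def pvFieldGeneralTitle : Nat → String
  | 0 => "IT Professional" | 1 => "Commerce Graduate" | _ => "Science Professional"

def pvDefaults : PySem.Dict String String :=
  PySem.Dict.ofList
    [("Student", "Student / Recent Graduate"),
     ("Fresher", "Entry-Level Professional"),
     ("Experienced", "Experienced Professional")]

def generate_professional_title_alt (user_prompt : String) (specific_field : Option String) (experience_level : String) : String :=
  let g := pvScan (PySem.Str.lower user_prompt).toList pvKeywords 4
  if g < 4 then
    if experience_level == "Student" then pvStudentTitle g
    else if g == 0 && experience_level == "Fresher" then "Aspiring Software Developer"
    else pvGeneralTitle g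
  else
    match specific_field with
    | some s =>
      if s ≠ "" then
        let f := pvScan (PySem.Str.lower s).toList pvFields 3
        if f < 3 then
          (if experience_level == "Student" then pvFieldStudentTitle f else pvFieldGeneralTitle f)
        else PySem.Dict.getD pvDefaults experience_level "Professional"
      else PySem.Dict.getD pvDefaults experience_level "Professional"
    | none => PySem.Dict.getD pvDefaults experience_level "Professional"

-- ===== PRECONDITION & SPEC =====
def Spec_generate_professional_title (user_prompt : String) (specific_field : Option String) (experience_level : String) (out : String) : Prop := out = generate_professional_title_alt user_prompt specific_field experience_level
instance (user_prompt : String) (specific_field : Option String) (experience_level : String) (out : String) : Decidable (Spec_generate_professional_title user_prompt specific_field experience_level out) := by unfold Spec_generate_professional_title; infer_instance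

-- ===== CLAIM (what is proved, stated in full; the proofs are below) =====
def Claim_equal_generate_professional_title : Prop := ∀ (user_prompt : String) (specific_field : Option String) (experience_level : String), Dom_generate_professional_title user_prompt specific_field experience_level → Spec_generate_professional_title user_prompt specific_field experience_level (generate_professional_title user_prompt specific_field experience_level)

-- ===== LEMMAS AND PROOFS =====

theorem pvScanStep_le (text : List Char) (table : List (List Char × Nat)) (i b : Nat) :
    pvScanStep text table i b ≤ b := by
  induction table generalizing b with
  | nil => simp [pvScanStep]
  | cons hd tl ih =>
    simp only [pvScanStep, List.foldl_cons]
    by_cases h : (decide (hd.2 < b) && PySem.Chars.startswith (text.drop i) hd.1) = true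
    · rw [if_pos h]
      have h1 : hd.2 < b := by
        have := (Bool.and_eq_true _ _).mp h
        exact of_decide_eq_true this.1
      exact le_trans (ih hd.2) (Nat.le_of_lt h1)
    · rw [if_neg h]; exact ih b

theorem pvScanStep_le_of (text : List Char) (table : List (List Char × Nat)) (i : Nat)
    (wg : List Char × Nat) (hm : wg ∈ table) (hp : wg.1 <+: text.drop i) (b : Nat) :
    pvScanStep text table i b ≤ wg.2 := by
  induction table generalizing b with
  | nil => cases hm
  | cons hd tl ih =>
    simp only [pvScanStep, List.foldl_cons]
    rcases List.mem_cons.mp hm with heq | hmem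
    · subst heq
      have hsw : PySem.Chars.startswith (text.drop i) wg.1 = true :=
        (PySem.Chars.startswith_iff _ _).mpr hp
      by_cases hb : wg.2 < b
      · rw [if_pos (by simp [hb, hsw])]
        exact pvScanStep_le text tl i wg.2
      · have : (decide (wg.2 < b) && PySem.Chars.startswith (text.drop i) wg.1) = false := by
          simp [hb]
        rw [this, if_neg (by simp)]
        exact le_trans (pvScanStep_le text tl i b) (Nat.le_of_not_lt hb)
    · exact ih hmem _

theorem pvScanStep_cases (text : List Char) (table : List (List Char × Nat)) (i b : Nat) :
    pvScanStep text table i b = b ∨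
      ∃ wg ∈ table, wg.1 <+: text.drop i ∧ pvScanStep text table i b = wg.2 := by
  induction table generalizing b with
  | nil => left; simp [pvScanStep]
  | cons hd tl ih =>
    simp only [pvScanStep, List.foldl_cons]
    by_cases h : (decide (hd.2 < b) && PySem.Chars.startswith (text.drop i) hd.1) = true
    · rw [if_pos h]
      have hp : hd.1 <+: text.drop i :=
        (PySem.Chars.startswith_iff _ _).mp ((Bool.and_eq_true _ _).mp h).2
      rcases ih hd.2 with h' | ⟨wg, hmem, hpre, he⟩
      · exact Or.inr ⟨hd, List.mem_cons_self .., hp, h'⟩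
      · exact Or.inr ⟨wg, List.mem_cons_of_mem _ hmem, hpre, he⟩
    · rw [if_neg h]
      rcases ih b with h' | ⟨wg, hmem, hpre, he⟩
      · exact Or.inl h'
      · exact Or.inr ⟨wg, List.mem_cons_of_mem _ hmem, hpre, he⟩

theorem pvScanF_le (text : List Char) (table : List (List Char × Nat)) (l : List Nat) (b : Nat) :
    l.foldl (fun b i => pvScanStep text table i b) b ≤ b := by
  induction l generalizing b with
  | nil => simp
  | cons hd tl ih =>
    simp only [List.foldl_cons]
    exact le_trans (ih _) (pvScanStep_le text table hd b)

theorem pvScanF_le_of (text : List Char) (table : List (List Char × Nat)) (l : List Nat)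
    (i : Nat) (hi : i ∈ l) (wg : List Char × Nat) (hm : wg ∈ table) (hp : wg.1 <+: text.drop i)
    (b : Nat) :
    l.foldl (fun b i => pvScanStep text table i b) b ≤ wg.2 := by
  induction l generalizing b with
  | nil => cases hi
  | cons hd tl ih =>
    simp only [List.foldl_cons]
    rcases List.mem_cons.mp hi with heq | hmem
    · subst heq
      exact le_trans (pvScanF_le text table tl _) (pvScanStep_le_of text table i wg hm hp b)
    · exact ih hmem _

theorem pvScanF_cases (text : List Char) (table : List (List Char × Nat)) (l : List Nat) (b : Nat) :
    l.foldl (fun b i => pvScanStep text table i b) b = b ∨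
      ∃ i ∈ l, ∃ wg ∈ table, wg.1 <+: text.drop i ∧
        l.foldl (fun b i => pvScanStep text table i b) b = wg.2 := by
  induction l generalizing b with
  | nil => left; simp
  | cons hd tl ih =>
    simp only [List.foldl_cons]
    rcases ih (pvScanStep text table hd b) with h' | ⟨i, hil, wg, hmem, hpre, he⟩
    · rw [h']
      rcases pvScanStep_cases text table hd b with h'' | ⟨wg, hmem, hpre, he⟩
      · exact Or.inl h''
      · exact Or.inr ⟨hd, List.mem_cons_self .., wg, hmem, hpre, he⟩
    · exact Or.inr ⟨i, List.mem_cons_of_mem _ hil, wg, hmem, hpre, he⟩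

theorem pvScan_le_miss (text : List Char) (table : List (List Char × Nat)) (miss : Nat) :
    pvScan text table miss ≤ miss := pvScanF_le text table _ miss

theorem pvScan_le_of_isIn (text : List Char) (table : List (List Char × Nat)) (miss : Nat)
    (wg : List Char × Nat) (hm : wg ∈ table) (hw : wg.1 ≠ [])
    (h : PySem.Chars.isIn wg.1 text = true) :
    pvScan text table miss ≤ wg.2 := by
  obtain ⟨j, hj⟩ := (PySem.Chars.exists_prefix_drop_iff_isIn wg.1 text).mpr h
  have hlt : j < text.length := by
    by_contra hge
    have hdrop : text.drop j = [] := List.drop_eq_nil_of_le (by omega)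
    rw [hdrop] at hj
    exact hw (List.prefix_nil.mp hj)
  exact pvScanF_le_of text table _ j (List.mem_range.mpr hlt) wg hm hj miss

theorem pvScan_cases (text : List Char) (table : List (List Char × Nat)) (miss : Nat) :
    pvScan text table miss = miss ∨
      ∃ wg ∈ table, PySem.Chars.isIn wg.1 text = true ∧ pvScan text table miss = wg.2 := by
  rcases pvScanF_cases text table (List.range text.length) miss with h | ⟨i, _, wg, hm, hp, he⟩
  · exact Or.inl h
  · exact Or.inr ⟨wg, hm, (PySem.Chars.exists_prefix_drop_iff_isIn wg.1 text).mp ⟨i, hp⟩, he⟩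

-- the prompt-table scan computes exactly A's first-matching-group chain
theorem pvKeywordScan (t : List Char) :
    pvScan t pvKeywords 4 =
      if (PySem.Chars.isIn "bca".toList t || PySem.Chars.isIn "computer".toList t ||
          PySem.Chars.isIn "software".toList t || PySem.Chars.isIn "programming".toList t) then 0
      else if (PySem.Chars.isIn "engineering".toList t || PySem.Chars.isIn "engineer".toList t) then 1
      else if (PySem.Chars.isIn "business".toList t || PySem.Chars.isIn "management".toList t ||
               PySem.Chars.isIn "mba".toList t) then 2
      else if (PySem.Chars.isIn "design".toList t || PySem.Chars.isIn "creative".toList t ||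
               PySem.Chars.isIn "art".toList t) then 3
      else 4 := by
  have hcases := pvScan_cases t pvKeywords 4
  have hmiss := pvScan_le_miss t pvKeywords 4
  split_ifs with h0 h1 h2 h3
  · have hle : pvScan t pvKeywords 4 ≤ 0 := by
      rcases Bool.or_eq_true _ _ |>.mp h0 with h | h
      · rcases Bool.or_eq_true _ _ |>.mp h with h | h
        · rcases Bool.or_eq_true _ _ |>.mp h with h | h
          · exact pvScan_le_of_isIn t pvKeywords 4 ("bca".toList, 0) (by simp [pvKeywords]) (by decide) h
          · exact pvScan_le_of_isIn t pvKeywords 4 ("computer".toList, 0) (by simp [pvKeywords]) (by decide) h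
        · exact pvScan_le_of_isIn t pvKeywords 4 ("software".toList, 0) (by simp [pvKeywords]) (by decide) h
      · exact pvScan_le_of_isIn t pvKeywords 4 ("programming".toList, 0) (by simp [pvKeywords]) (by decide) h
    omega
  · have hle : pvScan t pvKeywords 4 ≤ 1 := by
      rcases Bool.or_eq_true _ _ |>.mp h1 with h | h
      · exact pvScan_le_of_isIn t pvKeywords 4 ("engineering".toList, 1) (by simp [pvKeywords]) (by decide) h
      · exact pvScan_le_of_isIn t pvKeywords 4 ("engineer".toList, 1) (by simp [pvKeywords]) (by decide) h
    rcases hcases with h | ⟨wg, hmem, hin, he⟩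
    · omega
    · simp only [pvKeywords, List.mem_cons, List.not_mem_nil, or_false] at hmem
      simp only [Bool.or_eq_true] at h0
      rcases hmem with rfl|rfl|rfl|rfl|rfl|rfl|rfl|rfl|rfl|rfl|rfl|rfl <;> simp_all
  · have hle : pvScan t pvKeywords 4 ≤ 2 := by
      rcases Bool.or_eq_true _ _ |>.mp h2 with h | h
      · rcases Bool.or_eq_true _ _ |>.mp h with h | h
        · exact pvScan_le_of_isIn t pvKeywords 4 ("business".toList, 2) (by simp [pvKeywords]) (by decide) h
        · exact pvScan_le_of_isIn t pvKeywords 4 ("management".toList, 2) (by simp [pvKeywords]) (by decide) h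
      · exact pvScan_le_of_isIn t pvKeywords 4 ("mba".toList, 2) (by simp [pvKeywords]) (by decide) h
    rcases hcases with h | ⟨wg, hmem, hin, he⟩
    · omega
    · simp only [pvKeywords, List.mem_cons, List.not_mem_nil, or_false] at hmem
      simp only [Bool.or_eq_true] at h0 h1
      rcases hmem with rfl|rfl|rfl|rfl|rfl|rfl|rfl|rfl|rfl|rfl|rfl|rfl <;> simp_all
  · have hle : pvScan t pvKeywords 4 ≤ 3 := by
      rcases Bool.or_eq_true _ _ |>.mp h3 with h | h
      · rcases Bool.or_eq_true _ _ |>.mp h with h | h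
        · exact pvScan_le_of_isIn t pvKeywords 4 ("design".toList, 3) (by simp [pvKeywords]) (by decide) h
        · exact pvScan_le_of_isIn t pvKeywords 4 ("creative".toList, 3) (by simp [pvKeywords]) (by decide) h
      · exact pvScan_le_of_isIn t pvKeywords 4 ("art".toList, 3) (by simp [pvKeywords]) (by decide) h
    rcases hcases with h | ⟨wg, hmem, hin, he⟩
    · omega
    · simp only [pvKeywords, List.mem_cons, List.not_mem_nil, or_false] at hmem
      simp only [Bool.or_eq_true] at h0 h1 h2
      rcases hmem with rfl|rfl|rfl|rfl|rfl|rfl|rfl|rfl|rfl|rfl|rfl|rfl <;> simp_all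
  · rcases hcases with h | ⟨wg, hmem, hin, he⟩
    · exact h
    · simp only [pvKeywords, List.mem_cons, List.not_mem_nil, or_false] at hmem
      simp only [Bool.or_eq_true] at h0 h1 h2 h3
      rcases hmem with rfl|rfl|rfl|rfl|rfl|rfl|rfl|rfl|rfl|rfl|rfl|rfl <;> simp_all

theorem pvFieldScan (t : List Char) :
    pvScan t pvFields 3 =
      if PySem.Chars.isIn "computer".toList t then 0
      else if PySem.Chars.isIn "commerce".toList t then 1
      else if PySem.Chars.isIn "science".toList t then 2
      else 3 := by
  have hcases := pvScan_cases t pvFields 3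
  have hmiss := pvScan_le_miss t pvFields 3
  split_ifs with h0 h1 h2
  · have hle := pvScan_le_of_isIn t pvFields 3 ("computer".toList, 0) (by simp [pvFields]) (by decide) h0
    omega
  · have hle := pvScan_le_of_isIn t pvFields 3 ("commerce".toList, 1) (by simp [pvFields]) (by decide) h1
    rcases hcases with h | ⟨wg, hmem, hin, he⟩
    · omega
    · simp only [pvFields, List.mem_cons, List.not_mem_nil, or_false] at hmem
      rcases hmem with rfl|rfl|rfl <;> simp_all
  · have hle := pvScan_le_of_isIn t pvFields 3 ("science".toList, 2) (by simp [pvFields]) (by decide) h2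
    rcases hcases with h | ⟨wg, hmem, hin, he⟩
    · omega
    · simp only [pvFields, List.mem_cons, List.not_mem_nil, or_false] at hmem
      rcases hmem with rfl|rfl|rfl <;> simp_all
  · rcases hcases with h | ⟨wg, hmem, hin, he⟩
    · exact h
    · simp only [pvFields, List.mem_cons, List.not_mem_nil, or_false] at hmem
      rcases hmem with rfl|rfl|rfl <;> simp_all

theorem pvGetD3 (lvl c : String) :
    PySem.Dict.getD pvDefaults lvl c =
      if lvl = "Student" then "Student / Recent Graduate"
      else if lvl = "Fresher" then "Entry-Level Professional"
      else if lvl = "Experienced" then "Experienced Professional" else c := by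
  show PySem.Dict.getD (PySem.Dict.insert (PySem.Dict.insert (PySem.Dict.insert PySem.Dict.empty
    "Student" "Student / Recent Graduate") "Fresher" "Entry-Level Professional")
    "Experienced" "Experienced Professional") lvl c = _
  rw [PySem.Dict.getD_insert, PySem.Dict.getD_insert, PySem.Dict.getD_insert, PySem.Dict.getD_empty]
  split_ifs <;> simp_all

-- ===== VERDICT (by name: the statement is the Claim_ definition above) =====
set_option maxHeartbeats 2000000 in
theorem generate_professional_title_spec : Claim_equal_generate_professional_title := by
  intro up sf lvl _
  unfold Spec_generate_professional_title generate_professional_title generate_professional_title_alt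
  rw [pvKeywordScan]
  simp only [List.any_cons, List.any_nil, Bool.or_false, PySem.Str.isIn_eq]
  split_ifs <;> simp_all [pvStudentTitle, pvGeneralTitle] <;>
  · cases sf with
    | none => simp [pvAField, pvADefault, pvGetD3]
    | some s =>
      simp only [pvAField, pvADefault]
      by_cases hs : s = ""
      · simp [hs, pvGetD3]
      · simp only [hs, not_false_iff, if_neg]
        rw [pvFieldScan]
        simp [hs]
        split_ifs <;> simp_all [pvGetD3, pvFieldStudentTitle, pvFieldGeneralTitle]
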